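-- pv_equiv track=rewrite | github.com/nezlobnaya/project-algorithms | hare_tortoise_cycle_detection/hare_tortoiese_cycle_detection.py | hare_tortoise_cycle_detection
-- ===== SOURCE A (Python) =====
-- def hare_tortoise_cycle_detection(str):
--     tortoise = str[0]
--     hare = str[0]
--     while True:
--         tortoise = str[tortoise]
--         hare = str[str[hare]]
--         if tortoise == hare:
--             break
--     ptr1 = str[0]
--     ptr2 = tortoise
--     while ptr1 != ptr2:
--         ptr1 = str[ptr1]
--         ptr2 = str[ptr2]
--     return ptr1
-- ===== SOURCE B (Python) =====
-- def hare_tortoise_cycle_detection(str):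
--     seen = set()
--     current = str[0]
--     while current not in seen:
--         seen.add(current)
--         current = str[current]
--     return current
-- ===== Notes on version B (the rewrite author's own statement) =====
-- stated objective: simpler
-- what changed: Replaces Floyd's two-phase tortoise/hare algorithm (meet with 1x/2x pointers, then a second locate loop) by a single forward traversal that records visited nodes in a set and returns the first node seen twice.
import Mathlib
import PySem

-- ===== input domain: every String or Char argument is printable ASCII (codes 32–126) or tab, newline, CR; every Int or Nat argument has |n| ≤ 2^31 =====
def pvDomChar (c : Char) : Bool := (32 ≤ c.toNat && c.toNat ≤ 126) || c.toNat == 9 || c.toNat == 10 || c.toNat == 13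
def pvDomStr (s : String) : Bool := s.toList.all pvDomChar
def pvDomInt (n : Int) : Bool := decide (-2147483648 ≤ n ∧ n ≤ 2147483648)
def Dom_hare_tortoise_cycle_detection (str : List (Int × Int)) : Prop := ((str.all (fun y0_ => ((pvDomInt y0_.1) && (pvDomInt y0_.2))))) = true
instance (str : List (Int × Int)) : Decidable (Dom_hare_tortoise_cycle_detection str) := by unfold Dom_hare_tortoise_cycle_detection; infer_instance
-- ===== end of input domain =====

-- B replaces Floyd's two-phase tortoise/hare pointer chase by a single forward walk
-- that records visited nodes in a set and returns the first node seen twice (objective: simpler).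

-- dict lookup d[k]; total form with default 0, used only where Pre_ guarantees the key exists
def pvF (str : List (Int × Int)) (x : Int) : Int := (PySem.Dict.mk str).getD x 0

-- ===== PORT A =====
-- first while-loop of A: tortoise moves by f, hare by f∘f; equality is checked after stepping
def pvPhase1 (str : List (Int × Int)) : Nat → Int → Int → Int
  | 0, t, _ => t
  | fuel+1, t, h =>
    let t' := pvF str t
    let h' := pvF str (pvF str h)
    if t' = h' then t' else pvPhase1 str fuel t' h'

-- second while-loop of A: both pointers move by f until equal; equality is checked before stepping
def pvPhase2 (str : List (Int × Int)) : Nat → Int → Int → Int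
  | 0, p1, _ => p1
  | fuel+1, p1, p2 => if p1 = p2 then p1 else pvPhase2 str fuel (pvF str p1) (pvF str p2)

def hare_tortoise_cycle_detection (str : List (Int × Int)) : Int :=
  let t0 := pvF str 0
  let meet := pvPhase1 str (str.length + 1) t0 t0
  pvPhase2 str (str.length + 1) t0 meet

-- ===== PORT B =====
-- B's single loop: walk forward recording visited nodes; stop at the first repeated node
def pvSeenLoop (str : List (Int × Int)) : Nat → PySem.Set Int → Int → Int
  | 0, _, cur => cur
  | fuel+1, seen, cur =>
    if PySem.Set.contains seen cur then cur
    else pvSeenLoop str fuel (PySem.Set.add seen cur) (pvF str cur)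

def hare_tortoise_cycle_detection_alt (str : List (Int × Int)) : Int :=
  pvSeenLoop str (str.length + 1) PySem.Set.empty (pvF str 0)

-- ===== PRECONDITION & SPEC =====
-- the successor walk from key 0: pvWalk? str k = the walk's node after k+1 dict lookups,
-- none as soon as a lookup raises KeyError
def pvWalk? (str : List (Int × Int)) : Nat → Option Int
  | 0 => (PySem.Dict.mk str).get? 0
  | k+1 => (pvWalk? str k).bind (fun x => (PySem.Dict.mk str).get? x)

-- Pre_ excludes exactly the inputs on which A raises KeyError (key 0 missing, or the
-- successor walk from it reaches a missing key): once length+2 lookups succeed the walk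
-- has closed a cycle inside the dict's keys, so no later lookup can fail and A returns.
def Pre_hare_tortoise_cycle_detection (str : List (Int × Int)) : Prop :=
  (pvWalk? str (str.length + 1)).isSome = true
instance (str : List (Int × Int)) : Decidable (Pre_hare_tortoise_cycle_detection str) := by
  unfold Pre_hare_tortoise_cycle_detection; infer_instance

def pvWitness_hare_tortoise_cycle_detection : (List (Int × Int)) := [(0, 1), (1, 2), (2, 1)]

def Spec_hare_tortoise_cycle_detection (str : List (Int × Int)) (out : Int) : Prop :=
  out = hare_tortoise_cycle_detection_alt str
instance (str : List (Int × Int)) (out : Int) : Decidable (Spec_hare_tortoise_cycle_detection str out) := by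
  unfold Spec_hare_tortoise_cycle_detection; infer_instance

-- ===== CLAIM (what is proved, stated in full; the proofs are below) =====
def Claim_equal_hare_tortoise_cycle_detection : Prop :=
  ∀ (str : List (Int × Int)), Dom_hare_tortoise_cycle_detection str →
    Pre_hare_tortoise_cycle_detection str →
    Spec_hare_tortoise_cycle_detection str (hare_tortoise_cycle_detection str)

-- ===== LEMMAS AND PROOFS =====

-- the successor sequence of the walk: a 0 = d[0], a (k+1) = d[a k]
def pvSeq (str : List (Int × Int)) : Nat → Int
  | 0 => pvF str 0
  | k+1 => pvF str (pvSeq str k)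

-- a successful walk is successful at every earlier step
theorem pvWalk_mono (str : List (Int × Int)) :
    ∀ k j, j ≤ k → (pvWalk? str k).isSome = true → (pvWalk? str j).isSome = true := by
  intro k
  induction k with
  | zero => intro j hj h; have : j = 0 := by omega
            subst this; exact h
  | succ k ih =>
    intro j hj h
    rcases Nat.lt_or_ge j (k + 1) with hlt | hge
    · apply ih j (by omega)
      show (pvWalk? str k).isSome = true
      rcases hk : pvWalk? str k with _ | u
      · rw [show pvWalk? str (k+1) = (pvWalk? str k).bind
            (fun x => (PySem.Dict.mk str).get? x) from rfl, hk] at h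
        simp at h
      · rfl
    · have : j = k + 1 := by omega
      subst this; exact h

-- where the walk succeeds it computes pvSeq
theorem pvWalk_eq (str : List (Int × Int)) :
    ∀ k v, pvWalk? str k = some v → v = pvSeq str k := by
  intro k
  induction k with
  | zero =>
    intro v hv
    show v = pvF str 0
    unfold pvF
    have hv0 : (PySem.Dict.mk str).get? 0 = some v := hv
    rw [PySem.Dict.getD_eq_get?_getD, hv0]
    rfl
  | succ k ih =>
    intro v hv
    rw [show pvWalk? str (k+1) = (pvWalk? str k).bind
        (fun x => (PySem.Dict.mk str).get? x) from rfl] at hv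
    rcases hk : pvWalk? str k with _ | u
    · rw [hk] at hv; simp at hv
    · rw [hk] at hv
      simp only [Option.bind_some] at hv
      have hu : u = pvSeq str k := ih u hk
      show v = pvF str (pvSeq str k)
      unfold pvF
      rw [← hu, PySem.Dict.getD_eq_get?_getD, hv]
      rfl

-- under Pre_, the first length+1 nodes of the walk are keys of the dict
theorem pvSeq_mem_keys (str : List (Int × Int))
    (hpre : Pre_hare_tortoise_cycle_detection str) :
    ∀ k, k ≤ str.length → pvSeq str k ∈ (str.map Prod.fst) := by
  intro k hk
  have hs : (pvWalk? str (k + 1)).isSome = true :=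
    pvWalk_mono str (str.length + 1) (k + 1) (by omega) hpre
  rw [show pvWalk? str (k+1) = (pvWalk? str k).bind
      (fun x => (PySem.Dict.mk str).get? x) from rfl] at hs
  rcases hk2 : pvWalk? str k with _ | u
  · rw [hk2] at hs; simp at hs
  · rw [hk2] at hs
    simp only [Option.bind_some] at hs
    have hu : u = pvSeq str k := pvWalk_eq str k u hk2
    have hc : (PySem.Dict.mk str).contains (pvSeq str k) = true := by
      rw [PySem.Dict.contains_eq_isSome_get?, ← hu]; exact hs
    rw [PySem.Dict.contains_eq_decide_mem_keys] at hc
    simpa using hc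

-- pigeonhole: some node repeats within the first length+1 steps
theorem pvCollision (str : List (Int × Int))
    (hpre : Pre_hare_tortoise_cycle_detection str) :
    ∃ i j, i < j ∧ j ≤ str.length ∧ pvSeq str i = pvSeq str j := by
  have hmap : ∀ i ∈ Finset.range (str.length + 1),
      pvSeq str i ∈ (str.map Prod.fst).toFinset := by
    intro i hi
    simp only [Finset.mem_range] at hi
    exact List.mem_toFinset.mpr (pvSeq_mem_keys str hpre i (by omega))
  have hcard : (str.map Prod.fst).toFinset.card < (Finset.range (str.length + 1)).card := by
    have := (str.map Prod.fst).toFinset_card_le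
    simp only [Finset.card_range, List.length_map] at *
    omega
  obtain ⟨i, hi, j, hj, hne, heq⟩ :=
    Finset.exists_ne_map_eq_of_card_lt_of_maps_to hcard hmap
  simp only [Finset.mem_range] at hi hj
  rcases Nat.lt_or_ge i j with h | h
  · exact ⟨i, j, h, by omega, heq⟩
  · exact ⟨j, i, by omega, by omega, heq.symm⟩

-- shifting by one period
theorem pvPeriod1 (str : List (Int × Int)) (μ l : Nat)
    (hper : pvSeq str (μ + l) = pvSeq str μ) :
    ∀ i, μ ≤ i → pvSeq str (i + l) = pvSeq str i := by
  intro i hi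
  obtain ⟨d, rfl⟩ := Nat.le.dest hi
  induction d with
  | zero => simpa using hper
  | succ d ih =>
    have e1 : μ + (d + 1) + l = (μ + d + l) + 1 := by omega
    have e2 : μ + (d + 1) = (μ + d) + 1 := by omega
    rw [e1, e2]
    show pvF str (pvSeq str (μ + d + l)) = pvF str (pvSeq str (μ + d))
    rw [ih (by omega)]

-- shifting by several periods
theorem pvPeriod (str : List (Int × Int)) (μ l : Nat)
    (hper : pvSeq str (μ + l) = pvSeq str μ) :
    ∀ i m, μ ≤ i → pvSeq str (i + m * l) = pvSeq str i := by
  intro i m hi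
  induction m with
  | zero => simp
  | succ m ih =>
    have e : i + (m + 1) * l = (i + m * l) + l := by ring
    rw [e, pvPeriod1 str μ l hper _ (by omega), ih]

-- reducing an index ≥ μ into the window [μ, μ+l)
theorem pvReduce (str : List (Int × Int)) (μ l : Nat)
    (hper : pvSeq str (μ + l) = pvSeq str μ) :
    ∀ i, μ ≤ i → pvSeq str i = pvSeq str (μ + (i - μ) % l) := by
  intro i hi
  have hq := Nat.div_add_mod (i - μ) l
  have e : i = (μ + (i - μ) % l) + ((i - μ) / l) * l := by
    have : l * ((i - μ) / l) = ((i - μ) / l) * l := Nat.mul_comm _ _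
    omega
  calc pvSeq str i = pvSeq str ((μ + (i - μ) % l) + ((i - μ) / l) * l) := by rw [← e]
    _ = pvSeq str (μ + (i - μ) % l) := pvPeriod str μ l hper _ _ (by omega)

-- characterisation of collisions: a i = a j with i < j forces μ ≤ i and l ∣ (j - i)
theorem pvCollide_char (str : List (Int × Int)) (μ l : Nat) (hl : 0 < l)
    (hper : pvSeq str (μ + l) = pvSeq str μ)
    (hinj : ∀ i j, i < j → j < μ + l → pvSeq str i ≠ pvSeq str j)
    (i j : Nat) (hij : i < j) (heq : pvSeq str i = pvSeq str j) :
    μ ≤ i ∧ l ∣ (j - i) := by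
  have hinj' : ∀ a b, a < μ + l → b < μ + l → pvSeq str a = pvSeq str b → a = b := by
    intro a b ha hb hab
    rcases Nat.lt_trichotomy a b with h | h | h
    · exact absurd hab (hinj a b h hb)
    · exact h
    · exact absurd hab.symm (hinj b a h ha)
  rcases Nat.lt_or_ge i (μ + l) with hi | hi
  · rcases Nat.lt_or_ge j (μ + l) with hj | hj
    · exact absurd heq (hinj i j hij hj)
    · have hμj : μ ≤ j := by omega
      have hred := pvReduce str μ l hper j hμj
      have hlt : μ + (j - μ) % l < μ + l := by
        have := Nat.mod_lt (j - μ) hl; omega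
      have hieq : i = μ + (j - μ) % l :=
        hinj' i _ hi hlt (heq.trans hred)
      have hqj := Nat.div_add_mod (j - μ) l
      refine ⟨by omega, ⟨(j - μ) / l, ?_⟩⟩
      have hc : l * ((j - μ) / l) = ((j - μ) / l) * l := Nat.mul_comm _ _
      omega
  · have hredi := pvReduce str μ l hper i (by omega)
    have hredj := pvReduce str μ l hper j (by omega)
    have hlti : μ + (i - μ) % l < μ + l := by have := Nat.mod_lt (i - μ) hl; omega
    have hltj : μ + (j - μ) % l < μ + l := by have := Nat.mod_lt (j - μ) hl; omega
    have hieq : μ + (i - μ) % l = μ + (j - μ) % l :=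
      hinj' _ _ hlti hltj (hredi.symm.trans (heq.trans hredj))
    have hqi := Nat.div_add_mod (i - μ) l
    have hqj := Nat.div_add_mod (j - μ) l
    have hq1q2 : (i - μ) / l ≤ (j - μ) / l := by
      have : l * ((i - μ) / l) ≤ l * ((j - μ) / l) := by omega
      exact Nat.le_of_mul_le_mul_left this hl
    obtain ⟨d, hd⟩ := Nat.le.dest hq1q2
    refine ⟨by omega, ⟨d, ?_⟩⟩
    have hmul : l * ((j - μ) / l) = l * ((i - μ) / l) + l * d := by
      rw [← hd, Nat.mul_add]
    omega

-- A's first loop returns a i0, the first meeting point of tortoise and hare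
theorem pvPhase1_spec (str : List (Int × Int)) (i0 : Nat)
    (hmeet : pvSeq str i0 = pvSeq str (2 * i0))
    (hmin : ∀ i, 1 ≤ i → pvSeq str i = pvSeq str (2 * i) → i0 ≤ i) :
    ∀ fuel i, i < i0 → i0 ≤ i + fuel →
      pvPhase1 str fuel (pvSeq str i) (pvSeq str (2 * i)) = pvSeq str i0 := by
  intro fuel
  induction fuel with
  | zero => intro i h1 h2; omega
  | succ fuel ih =>
    intro i h1 h2
    show (if pvF str (pvSeq str i) = pvF str (pvF str (pvSeq str (2 * i))) then
        pvF str (pvSeq str i)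
      else pvPhase1 str fuel (pvF str (pvSeq str i)) (pvF str (pvF str (pvSeq str (2 * i))))) = _
    have ht : pvF str (pvSeq str i) = pvSeq str (i + 1) := rfl
    have hh : pvF str (pvF str (pvSeq str (2 * i))) = pvSeq str (2 * (i + 1)) := by
      show pvF str (pvF str (pvSeq str (2 * i))) = pvSeq str (2 * i + 1 + 1)
      rfl
    rw [ht, hh]
    by_cases hc : pvSeq str (i + 1) = pvSeq str (2 * (i + 1))
    · rw [if_pos hc]
      have h3 : i0 ≤ i + 1 := hmin (i + 1) (by omega) hc
      have h4 : i0 = i + 1 := by omega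
      rw [h4]
    · rw [if_neg hc]
      have hne : i + 1 ≠ i0 := by
        intro h; rw [h] at hc; exact hc hmeet
      exact ih (i + 1) (by omega) (by omega)

-- A's second loop returns a μ, the cycle entrance
theorem pvPhase2_spec (str : List (Int × Int)) (μ l : Nat) (hl : 0 < l)
    (hper : pvSeq str (μ + l) = pvSeq str μ)
    (hinj : ∀ i j, i < j → j < μ + l → pvSeq str i ≠ pvSeq str j)
    (i0 : Nat) (hi0 : 1 ≤ i0) (hdvd : l ∣ i0) :
    ∀ fuel t, t ≤ μ → μ < t + fuel →
      pvPhase2 str fuel (pvSeq str t) (pvSeq str (i0 + t)) = pvSeq str μ := by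
  intro fuel
  induction fuel with
  | zero => intro t h1 h2; omega
  | succ fuel ih =>
    intro t h1 h2
    show (if pvSeq str t = pvSeq str (i0 + t) then pvSeq str t
      else pvPhase2 str fuel (pvF str (pvSeq str t)) (pvF str (pvSeq str (i0 + t)))) = _
    by_cases hc : pvSeq str t = pvSeq str (i0 + t)
    · rw [if_pos hc]
      have h3 := pvCollide_char str μ l hl hper hinj t (i0 + t) (by omega) hc
      have h4 : t = μ := by omega
      rw [h4]
    · rw [if_neg hc]
      have htμ : t ≠ μ := by
        intro h
        obtain ⟨m, hm⟩ := hdvd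
        have hp : pvSeq str (t + m * l) = pvSeq str t := pvPeriod str μ l hper t m (by omega)
        apply hc
        rw [Nat.add_comm i0 t, hm, Nat.mul_comm]
        exact hp.symm
      have e1 : pvF str (pvSeq str t) = pvSeq str (t + 1) := rfl
      have e2 : pvF str (pvSeq str (i0 + t)) = pvSeq str (i0 + (t + 1)) := rfl
      rw [e1, e2]
      exact ih (t + 1) (by omega) (by omega)

-- B's loop stops exactly at step μ+l, returning a (μ+l) = a μ
theorem pvSeenLoop_spec (str : List (Int × Int)) (μ l : Nat) (hl : 0 < l)
    (hper : pvSeq str (μ + l) = pvSeq str μ)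
    (hinj : ∀ i j, i < j → j < μ + l → pvSeq str i ≠ pvSeq str j) :
    ∀ fuel k (seen : PySem.Set Int),
      (∀ x, x ∈ seen ↔ ∃ j, j < k ∧ pvSeq str j = x) →
      k ≤ μ + l → μ + l < k + fuel →
      pvSeenLoop str fuel seen (pvSeq str k) = pvSeq str (μ + l) := by
  intro fuel
  induction fuel with
  | zero => intro k seen _ h1 h2; omega
  | succ fuel ih =>
    intro k seen hseen h1 h2
    show (if PySem.Set.contains seen (pvSeq str k) then pvSeq str k
      else pvSeenLoop str fuel (PySem.Set.add seen (pvSeq str k)) (pvF str (pvSeq str k))) = _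
    by_cases hc : pvSeq str k ∈ seen
    · rw [if_pos (by rwa [PySem.Set.contains_iff])]
      obtain ⟨j, hj, hje⟩ := (hseen _).mp hc
      obtain ⟨hμj, hd⟩ := pvCollide_char str μ l hl hper hinj j k hj hje
      obtain ⟨m, hm⟩ := hd
      have hk : k = μ + l := by
        rcases m with _ | m
        · simp at hm; omega
        · have : l * (m + 1) = l * m + l := by ring
          omega
      rw [hk]
    · rw [if_neg (by simp only [PySem.Set.contains_iff]; exact hc)]
      have hk : k ≠ μ + l := by
        intro h; subst h
        exact hc ((hseen _).mpr ⟨μ, by omega, hper.symm⟩)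
      have e : pvF str (pvSeq str k) = pvSeq str (k + 1) := rfl
      rw [e]
      apply ih (k + 1) _ _ (by omega) (by omega)
      intro x
      rw [PySem.Set.mem_add, hseen x]
      constructor
      · rintro (⟨j, hj, hje⟩ | rfl)
        · exact ⟨j, by omega, hje⟩
        · exact ⟨k, by omega, rfl⟩
      · rintro ⟨j, hj, hje⟩
        rcases Nat.lt_or_ge j k with h | h
        · exact Or.inl ⟨j, h, hje⟩
        · have hjk : j = k := by omega
          subst hjk; exact Or.inr hje.symm

-- ===== VERDICT (by name: the statement is the Claim_ definition above) =====
theorem hare_tortoise_cycle_detection_spec : Claim_equal_hare_tortoise_cycle_detection := by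
  intro str _ hpre
  unfold Spec_hare_tortoise_cycle_detection
  -- a collision exists within length+1 steps
  obtain ⟨ci, cj, hcij, hcjn, hceq⟩ := pvCollision str hpre
  have hex : ∃ j, ∃ i, i < j ∧ pvSeq str i = pvSeq str j := ⟨cj, ci, hcij, hceq⟩
  -- j0: the first index at which a value repeats; μ its earlier partner; l the period
  set j0 := Nat.find hex with hj0def
  have hj0n : j0 ≤ str.length := le_trans (Nat.find_min' hex ⟨ci, hcij, hceq⟩) hcjn
  obtain ⟨μ, hμlt, hμe⟩ := Nat.find_spec hex
  set l := j0 - μ with hldef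
  have hl : 0 < l := by omega
  have hμl : μ + l = j0 := by omega
  have hper : pvSeq str (μ + l) = pvSeq str μ := by rw [hμl]; exact hμe.symm
  have hinj : ∀ i j, i < j → j < μ + l → pvSeq str i ≠ pvSeq str j := by
    intro i j hij hjlt he
    exact Nat.find_min hex (by omega : j < j0) ⟨i, hij, he⟩
  -- a meeting index for Floyd exists below μ + l
  have hqμ := Nat.div_add_mod μ l
  have hmod : μ % l < l := Nat.mod_lt μ hl
  have hwc : l * (μ / l + 1) = l * (μ / l) + l := by ring
  have hw1 : 1 ≤ l * (μ / l + 1) := by omega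
  have hwμ : μ ≤ l * (μ / l + 1) := by omega
  have hwb : l * (μ / l + 1) ≤ μ + l := by omega
  have hmeetw : pvSeq str (l * (μ / l + 1)) = pvSeq str (2 * (l * (μ / l + 1))) := by
    have hp := pvPeriod str μ l hper (l * (μ / l + 1)) (μ / l + 1) hwμ
    have e : l * (μ / l + 1) + (μ / l + 1) * l = 2 * (l * (μ / l + 1)) := by ring
    rw [e] at hp
    exact hp.symm
  have hex2 : ∃ i, 1 ≤ i ∧ pvSeq str i = pvSeq str (2 * i) := ⟨_, hw1, hmeetw⟩
  set i0 := Nat.find hex2 with hi0def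
  obtain ⟨hi01, hmeet⟩ := Nat.find_spec hex2
  have hmin : ∀ i, 1 ≤ i → pvSeq str i = pvSeq str (2 * i) → i0 ≤ i := by
    intro i h1 h2
    exact Nat.find_min' hex2 ⟨h1, h2⟩
  have hi0b : i0 ≤ μ + l := le_trans (Nat.find_min' hex2 ⟨hw1, hmeetw⟩) hwb
  obtain ⟨hμi0, hdvd⟩ := by
    have h := pvCollide_char str μ l hl hper hinj i0 (2 * i0) (by omega) hmeet
    have e : 2 * i0 - i0 = i0 := by omega
    rw [e] at h
    exact h
  -- evaluate A
  have ha0 : pvF str 0 = pvSeq str 0 := rfl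
  have hA : hare_tortoise_cycle_detection str = pvSeq str μ := by
    show pvPhase2 str (str.length + 1) (pvF str 0)
        (pvPhase1 str (str.length + 1) (pvF str 0) (pvF str 0)) = pvSeq str μ
    rw [ha0]
    have hm : pvPhase1 str (str.length + 1) (pvSeq str 0) (pvSeq str 0) = pvSeq str i0 := by
      have := pvPhase1_spec str i0 hmeet hmin (str.length + 1) 0 (by omega) (by omega)
      simpa using this
    rw [hm]
    have h2 := pvPhase2_spec str μ l hl hper hinj i0 hi01 hdvd (str.length + 1) 0
      (by omega) (by omega)
    simpa using h2
  -- evaluate B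
  have hB : hare_tortoise_cycle_detection_alt str = pvSeq str μ := by
    unfold hare_tortoise_cycle_detection_alt
    rw [ha0]
    have hs := pvSeenLoop_spec str μ l hl hper hinj (str.length + 1) 0 PySem.Set.empty
      (by intro x; simp [PySem.Set.empty]) (by omega) (by omega)
    simpa [hper] using hs
  rw [hA, hB]
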